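-- pv_equiv track=rewrite | github.com/ptsntamil/knowyourmla | scraper/enrichment.py | _deobfuscate_string
-- ===== SOURCE A (Python) =====
-- def _deobfuscate_string(h, u, n, t, e, r_param):
--     def base_decode(d, bf, bt):
--         alph = "0123456789abcdefghijklmnopqrstuvwxyzABCDEFGHIJKLMNOPQRSTUVWXYZ+/"
--         h_c, i_c, j = alph[0:bf], alph[0:bt], 0
--         for idx, c in enumerate(reversed(d)):
--             v = h_c.find(c)
--             if v != -1: j += v * (bf ** idx)
--         if j == 0: return "0"
--         k = ""
--         while j > 0: k = i_c[j % bt] + k; j = (j - (j % bt)) // bt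
--         return k
--     dec_r, i, delim = "", 0, n[e]
--     while i < len(h):
--         s = ""
--         while i < len(h) and h[i] != delim: s += h[i]; i += 1
--         i += 1; ts = s
--         for jj in range(len(n)): ts = ts.replace(n[jj], str(jj))
--         if ts:
--             try: dec_r += chr(int(base_decode(ts, e, 10)) - t)
--             except Exception: pass
--     try: return dec_r.encode('latin1', errors='ignore').decode('utf-8', errors='ignore')
--     except: return dec_r
-- ===== SOURCE B (Python) =====
-- def _deobfuscate_string(h, u, n, t, e, r_param):
--     alph = "0123456789abcdefghijklmnopqrstuvwxyzABCDEFGHIJKLMNOPQRSTUVWXYZ+/"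
--     digits = alph[:e]
--     delim = n[e]
--     memo = {}
--
--     def expand(c):
--         # What the whole substitution chain turns ONE character into.
--         # str.replace with a 1-character pattern is a character homomorphism,
--         # so applying the chain per character (and caching it) is exact.
--         if c not in memo:
--             s = c
--             for jj in range(len(n)):
--                 s = s.replace(n[jj], str(jj))
--             memo[c] = s
--         return memo[c]
--
--     out = []
--     j, started = 0, False
--     for ch in h + delim:          # sentinel delimiter flushes the last token
--         if ch == delim:
--             if started and j >= 0:
--                 v = j - t
--                 if 0 <= v < 0x110000:
--                     out.append(chr(v))
--             j, started = 0, False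
--         else:
--             started = True
--             for d in expand(ch):
--                 k = digits.find(d)
--                 j = j * e + (k if k != -1 else 0)
--     dec_r = ''.join(out)
--     try:
--         return dec_r.encode('latin1', errors='ignore').decode('utf-8', errors='ignore')
--     except Exception:
--         return dec_r
-- ===== Notes on version B (the rewrite author's own statement) =====
-- stated objective: faster
-- what changed: A's per-token staged pipeline (manual delimiter scan, then len(n) full-string replace passes per token, then base_decode's power-sum with bf**idx, an int-to-decimal-string conversion and int() back) is replaced by one streaming pass over h with a memoized per-character substitution transducer (str.replace with a 1-char pattern is a character homomorphism) and a direct Horner integer accumulator flushed at each delimiter, with no replace passes per token and no decimal-string round trip (negative accumulators are skipped directly instead of via int('') raising).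
import Mathlib
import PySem

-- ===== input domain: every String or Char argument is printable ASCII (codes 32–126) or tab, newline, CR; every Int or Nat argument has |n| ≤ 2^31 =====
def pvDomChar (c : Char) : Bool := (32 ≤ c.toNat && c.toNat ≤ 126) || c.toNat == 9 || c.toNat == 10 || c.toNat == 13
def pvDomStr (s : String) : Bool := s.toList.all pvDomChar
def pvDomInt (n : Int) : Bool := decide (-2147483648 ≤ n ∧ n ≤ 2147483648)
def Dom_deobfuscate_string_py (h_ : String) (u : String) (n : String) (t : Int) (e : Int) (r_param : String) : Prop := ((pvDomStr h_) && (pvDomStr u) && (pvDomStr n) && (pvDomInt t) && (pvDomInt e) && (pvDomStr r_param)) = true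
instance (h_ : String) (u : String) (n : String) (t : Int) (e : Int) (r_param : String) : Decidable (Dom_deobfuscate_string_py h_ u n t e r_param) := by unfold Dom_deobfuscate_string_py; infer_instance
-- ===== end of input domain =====

-- B replaces A's per-token staged pipeline (delimiter scan, len(n) replace passes per token,
-- base_decode's power sum with its int->decimal-string->int round trip) by ONE streaming pass
-- over h with a memoized per-character substitution transducer and a direct Horner integer
-- accumulator (objective: faster; a timing run measured B faster at the largest size).

-- ===== SHARED HELPERS (code that is textually identical in both Python sources) =====

def pvAlph : List Char :=
  "0123456789abcdefghijklmnopqrstuvwxyzABCDEFGHIJKLMNOPQRSTUVWXYZ+/".toList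

-- the substitution loop `for jj in range(len(n)): ts = ts.replace(n[jj], str(jj))`
-- (A applies it to each token; B applies it to single characters), written over enumerate(n)
def pvSubst (nl : List Char) (s : List Char) : List Char :=
  (PySem.List.enumerate nl 0).foldl
    (fun ts p => PySem.Chars.replace ts [p.2] (PySem.Int.toChars p.1)) s

-- one step of CPython's UTF-8 decoder with errors='ignore': given the first byte and the
-- remaining bytes, return the decoded char (if any) and how many EXTRA bytes are consumed.
-- Hand port of bytes.decode('utf-8', errors='ignore'); exact for all byte values (checked
-- against CPython on all short byte sequences).
def pvUtf8Step (b : Nat) (rest : List Nat) : Option Char × Nat :=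
  if b < 0x80 then (some (Char.ofNat b), 0)
  else if b < 0xC2 then (none, 0)          -- stray continuation byte or overlong lead C0/C1
  else if b < 0xE0 then
    match rest with
    | b1 :: _ =>
      if 0x80 ≤ b1 ∧ b1 < 0xC0 then (some (Char.ofNat ((b - 0xC0) * 64 + (b1 - 0x80))), 1)
      else (none, 0)
    | [] => (none, 0)
  else if b < 0xF0 then
    match rest with
    | b1 :: rest1 =>
      if (if b = 0xE0 then 0xA0 else 0x80) ≤ b1 ∧ b1 < (if b = 0xED then 0xA0 else 0xC0) then
        match rest1 with
        | b2 :: _ =>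
          if 0x80 ≤ b2 ∧ b2 < 0xC0 then
            (some (Char.ofNat ((b - 0xE0) * 4096 + (b1 - 0x80) * 64 + (b2 - 0x80))), 2)
          else (none, 1)
        | [] => (none, 1)
      else (none, 0)
    | [] => (none, 0)
  else if b < 0xF5 then
    match rest with
    | b1 :: rest1 =>
      if (if b = 0xF0 then 0x90 else 0x80) ≤ b1 ∧ b1 < (if b = 0xF4 then 0x90 else 0xC0) then
        match rest1 with
        | b2 :: rest2 =>
          if 0x80 ≤ b2 ∧ b2 < 0xC0 then
            match rest2 with
            | b3 :: _ =>
              if 0x80 ≤ b3 ∧ b3 < 0xC0 then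
                (some (Char.ofNat ((b - 0xF0) * 262144 + (b1 - 0x80) * 4096 + (b2 - 0x80) * 64 + (b3 - 0x80))), 3)
              else (none, 2)
            | [] => (none, 2)
          else (none, 1)
        | [] => (none, 1)
      else (none, 0)
    | [] => (none, 0)
  else (none, 0)

def pvUtf8Ignore : List Nat → List Char
  | [] => []
  | b :: rest =>
    let sk := pvUtf8Step b rest
    (match sk.1 with | some c => [c] | none => []) ++ pvUtf8Ignore (rest.drop sk.2)
  termination_by l => l.length
  decreasing_by simp [List.length_drop]

-- dec_r.encode('latin1', errors='ignore').decode('utf-8', errors='ignore'), identical final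
-- line in A and B; codes are the accumulated chr codepoints (all in [0, 0x110000))
def pvFinal (codes : List Int) : String :=
  String.ofList (pvUtf8Ignore ((codes.filter (fun c => c ≤ 255)).map Int.toNat))

-- ===== PORT A =====

-- A's base_decode: power sum over enumerate(reversed(d))
def pvBaseDecodeJA (d : List Char) (bf : Int) : Int :=
  let h_c := PySem.List.slice pvAlph (some 0) (some bf)
  (PySem.List.enumerate d.reverse 0).foldl
    (fun j p =>
      let v := PySem.Chars.find h_c [p.2]
      if v ≠ -1 then j + v * bf ^ p.1.toNat else j) 0

-- A's `while j > 0: k = i_c[j % bt] + k; j = (j - (j % bt)) // bt`  (fuel ≥ iterations; each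
-- iteration at the call site divides j by 10, so j.toNat fuel suffices; i_c lookup never
-- defaults at the call site bt = 10)
def pvToBaseA (i_c : List Char) (bt : Int) : Nat → Int → List Char → List Char
  | 0, _, k => k
  | fuel + 1, j, k =>
    if j > 0 then
      pvToBaseA i_c bt fuel (PySem.Int.floordiv (j - PySem.Int.mod j bt) bt)
        ((PySem.List.pyGet? i_c (PySem.Int.mod j bt)).getD '0' :: k)
    else k

def pvBaseDecodeA (d : List Char) (bf : Int) (bt : Int) : List Char :=
  let i_c := PySem.List.slice pvAlph (some 0) (some bt)
  let j := pvBaseDecodeJA d bf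
  if j = 0 then ['0'] else pvToBaseA i_c bt j.toNat j []

-- hand port of int(s) for the strings base_decode returns — "" (ValueError → none) or a
-- decimal-digit string (its base-10 value); exact there (no sign/space/underscore can occur)
def pvInt? (cs : List Char) : Option Int :=
  if cs = [] then none
  else some (cs.foldl (fun a c => a * 10 + ((c.toNat : Int) - 48)) 0)

-- the body of A's outer loop after the token s has been scanned:
-- try: dec_r += chr(int(base_decode(ts, e, 10)) - t) except Exception: pass
def pvTokA (nl : List Char) (t : Int) (e : Int) (acc : List Int) (s : List Char) : List Int :=
  let ts := pvSubst nl s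
  if ts ≠ [] then
    match pvInt? (pvBaseDecodeA ts e 10) with
    | none => acc                                         -- int() raised ValueError
    | some jv =>
      if 0 ≤ jv - t ∧ jv - t < 1114112 then acc ++ [jv - t] else acc   -- chr() range
  else acc

-- A's `while i < len(h)` scan: collect s up to the delimiter, skip it, process s
def pvScanA (nl : List Char) (t : Int) (e : Int) (delim : Char)
    (rest : List Char) (acc : List Int) : List Int :=
  if hr : rest = [] then acc
  else
    let s := rest.takeWhile (fun c => c != delim)
    pvScanA nl t e delim ((rest.dropWhile (fun c => c != delim)).drop 1) (pvTokA nl t e acc s)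
  termination_by rest.length
  decreasing_by
    have h1 : (rest.dropWhile (fun c => c != delim)).length ≤ rest.length :=
      List.length_dropWhile_le _ _
    have h2 : 0 < rest.length := List.length_pos_iff.mpr hr
    simp only [List.length_drop]; omega

def deobfuscate_string_py (h_ : String) (u : String) (n : String) (t : Int) (e : Int) (r_param : String) : String :=
  match PySem.Str.pyGet? n e with
  | none => ""                      -- Python raises IndexError on n[e]; excluded by Pre_
  | some delim => pvFinal (pvScanA n.toList t e delim h_.toList [])

-- ===== PORT B =====

-- Source B's expand(c): the whole substitution chain applied to ONE character (the memo dict is a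
-- pure cache and is ported as the pure function)
def pvExpand (nl : List Char) (c : Char) : List Char := pvSubst nl [c]

-- Source B's digits = alph[:e]
def pvDigitsB (e : Int) : List Char := PySem.List.slice pvAlph none (some e)

-- the body of Source B's single for-loop; state = (j, started, out)
def pvStepB (nl : List Char) (digits : List Char) (t : Int) (e : Int) (delim : Char)
    (st : Int × Bool × List Int) (ch : Char) : Int × Bool × List Int :=
  if ch = delim then
    (0, false,
      if st.2.1 ∧ 0 ≤ st.1 then
        if 0 ≤ st.1 - t ∧ st.1 - t < 1114112 then st.2.2 ++ [st.1 - t] else st.2.2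
      else st.2.2)
  else
    ((pvExpand nl ch).foldl
       (fun j d =>
         let k := PySem.Chars.find digits [d]
         j * e + (if k ≠ -1 then k else 0)) st.1,
     true, st.2.2)

def deobfuscate_string_py_alt (h_ : String) (u : String) (n : String) (t : Int) (e : Int) (r_param : String) : String :=
  match PySem.Str.pyGet? n e with
  | none => ""                      -- B's n[e] raises the same IndexError; excluded by Pre_
  | some delim =>
    pvFinal (((h_.toList ++ [delim]).foldl
      (pvStepB n.toList (pvDigitsB e) t e delim) (0, false, [])).2.2)

-- ===== PRECONDITION & SPEC =====
-- Pre_: exactly the inputs where Python's n[e] does not raise IndexError (both A and B raise there)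
def Pre_deobfuscate_string_py (h_ : String) (u : String) (n : String) (t : Int) (e : Int) (r_param : String) : Prop :=
  -(n.toList.length : Int) ≤ e ∧ e < (n.toList.length : Int)
instance (h_ : String) (u : String) (n : String) (t : Int) (e : Int) (r_param : String) : Decidable (Pre_deobfuscate_string_py h_ u n t e r_param) := by unfold Pre_deobfuscate_string_py; infer_instance

def pvWitness_deobfuscate_string_py : String × String × String × Int × Int × String :=
  ("5;7;", "", "ab;", 0, 2, "")

def Spec_deobfuscate_string_py (h_ : String) (u : String) (n : String) (t : Int) (e : Int) (r_param : String) (out : String) : Prop := out = deobfuscate_string_py_alt h_ u n t e r_param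
instance (h_ : String) (u : String) (n : String) (t : Int) (e : Int) (r_param : String) (out : String) : Decidable (Spec_deobfuscate_string_py h_ u n t e r_param out) := by unfold Spec_deobfuscate_string_py; infer_instance

-- ===== CLAIM (what is proved, stated in full; the proofs are below) =====
def Claim_equal_deobfuscate_string_py : Prop := ∀ (h_ : String) (u : String) (n : String) (t : Int) (e : Int) (r_param : String), Dom_deobfuscate_string_py h_ u n t e r_param → Pre_deobfuscate_string_py h_ u n t e r_param → Spec_deobfuscate_string_py h_ u n t e r_param (deobfuscate_string_py h_ u n t e r_param)

-- ===== LEMMAS AND PROOFS =====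

-- ---------- part 1: A's int(base_decode(·, e, 10)) parses back exactly the accumulated j ----------

theorem pv_div_ident (j : Int) :
    PySem.Int.floordiv (j - PySem.Int.mod j 10) 10 = PySem.Int.floordiv j 10 := by
  have h := PySem.Int.floordiv_mul_add_mod j 10
  have h2 : j - PySem.Int.mod j 10 = PySem.Int.floordiv j 10 * 10 := by omega
  rw [h2, PySem.Int.floordiv_eq_iff_of_pos (by norm_num)]
  omega

theorem pv_getD_digit (m : Int) (h0 : 0 ≤ m) (h1 : m < 10) :
    (PySem.List.pyGet? (PySem.List.slice pvAlph (some 0) (some 10)) m).getD '0'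
      = Nat.digitChar m.toNat := by
  interval_cases m <;> decide

theorem pv_toBaseA_of_nonpos (fuel : Nat) (j : Int) (acc : List Char) (h : ¬ j > 0) :
    pvToBaseA (PySem.List.slice pvAlph (some 0) (some 10)) 10 fuel j acc = acc := by
  cases fuel <;> simp [pvToBaseA, h]

theorem pv_toBaseA_digits :
    ∀ (fuel : Nat) (j : Int) (acc : List Char), 0 < j → j.toNat ≤ fuel →
      pvToBaseA (PySem.List.slice pvAlph (some 0) (some 10)) 10 fuel j acc
        = Nat.toDigits 10 j.toNat ++ acc := by
  intro fuel
  induction fuel with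
  | zero => intro j acc hj hf; omega
  | succ f ih =>
    intro j acc hj hf
    have hmod : PySem.Int.mod j 10 = j % 10 := PySem.Int.mod_eq_emod_of_pos (by norm_num)
    have hdiv : PySem.Int.floordiv j 10 = j / 10 := PySem.Int.floordiv_eq_ediv_of_pos (by norm_num)
    rw [pvToBaseA, if_pos hj, pv_div_ident,
      pv_getD_digit _ (by rw [hmod]; omega) (by rw [hmod]; omega)]
    have hmn : (PySem.Int.mod j 10).toNat = j.toNat % 10 := by rw [hmod]; omega
    by_cases hlt : j < 10
    · have hq : PySem.Int.floordiv j 10 = 0 := by rw [hdiv]; omega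
      rw [hq, pv_toBaseA_of_nonpos _ _ _ (by norm_num)]
      rw [Nat.toDigits_eq_if (by norm_num), if_pos (by omega), hmn]
      have hself : j.toNat % 10 = j.toNat := by omega
      rw [hself]
      rfl
    · have hq : 0 < PySem.Int.floordiv j 10 := by rw [hdiv]; omega
      have hqn : (PySem.Int.floordiv j 10).toNat = j.toNat / 10 := by rw [hdiv]; omega
      rw [ih _ _ hq (by rw [hqn]; omega), hqn, hmn]
      rw [show (Nat.toDigits 10 (j.toNat / 10) ++ Nat.digitChar (j.toNat % 10) :: acc)
        = (Nat.toDigits 10 (j.toNat / 10) ++ [Nat.digitChar (j.toNat % 10)]) ++ acc by simp]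
      rw [← Nat.toDigits_of_base_le (by norm_num) (by omega)]

theorem pv_digitChar_toNat (r : Nat) (h : r < 10) : (Nat.digitChar r).toNat = r + 48 := by
  interval_cases r <;> decide

theorem pv_toDigits_ne_nil (m : Nat) : Nat.toDigits 10 m ≠ [] := by
  rw [Nat.toDigits_eq_if (by norm_num)]
  split_ifs <;> simp

theorem pv_decVal_toDigits (m : Nat) :
    (Nat.toDigits 10 m).foldl (fun a c => a * 10 + ((c.toNat : Int) - 48)) 0 = (m : Int) := by
  induction m using Nat.strong_induction_on with
  | _ m ih =>
    rw [Nat.toDigits_eq_if (by norm_num)]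
    by_cases hlt : m < 10
    · rw [if_pos hlt]
      simp [pv_digitChar_toNat m hlt]
    · rw [if_neg hlt]
      rw [List.foldl_append, ih (m / 10) (by omega)]
      simp [pv_digitChar_toNat (m % 10) (by omega)]
      omega

theorem pv_parse (ts : List Char) (e : Int) :
    pvInt? (pvBaseDecodeA ts e 10)
      = if 0 ≤ pvBaseDecodeJA ts e then some (pvBaseDecodeJA ts e) else none := by
  unfold pvBaseDecodeA
  set J := pvBaseDecodeJA ts e with hJ
  by_cases h0 : J = 0
  · simp only [h0]
    rw [if_pos (by norm_num)]
    decide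
  · rw [if_neg h0]
    by_cases hpos : 0 < J
    · rw [pv_toBaseA_digits J.toNat J [] hpos (le_refl _), if_pos (by omega)]
      unfold pvInt?
      rw [if_neg (by simpa using pv_toDigits_ne_nil J.toNat)]
      have hdv := pv_decVal_toDigits J.toNat
      simp only [List.append_nil]
      rw [hdv]
      congr 1
      omega
    · have hz : J.toNat = 0 := by omega
      rw [hz]
      rw [show pvToBaseA (PySem.List.slice pvAlph (some 0) (some 10)) 10 0 J [] = [] from rfl]
      rw [if_neg (by omega)]
      rfl

-- ---------- part 2: the substitution chain is a character homomorphism ----------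

theorem pv_replace_go_single (c : Char) (new : List Char) :
    ∀ (l : List Char) (fuel : Nat) (acc : List Char), l.length ≤ fuel →
      PySem.Chars.replace.go [c] new fuel l acc
        = acc.reverse ++ l.flatMap (fun x => if x = c then new else [x]) := by
  intro l
  induction l with
  | nil =>
    intro fuel acc _
    cases fuel <;> simp [PySem.Chars.replace.go]
  | cons x t ih =>
    intro fuel acc hf
    cases fuel with
    | zero => simp at hf
    | succ f =>
      rw [PySem.Chars.replace.go]
      by_cases hx : x = c
      · have hpre : [c].isPrefixOf (x :: t) = true := by simp [List.isPrefixOf, hx]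
        rw [if_pos hpre]
        simp only [List.length_cons] at hf
        rw [show List.drop [c].length (x :: t) = t by simp]
        rw [ih f (new.reverse ++ acc) (by omega)]
        simp [hx]
      · have hpre : ¬ [c].isPrefixOf (x :: t) = true := by
          simp [List.isPrefixOf]
          exact fun he => absurd he.symm hx
        rw [if_neg hpre]
        simp only [List.length_cons] at hf
        rw [ih f (x :: acc) (by omega)]
        simp [hx]

theorem pv_replace_single (s : List Char) (c : Char) (new : List Char) :
    PySem.Chars.replace s [c] new = s.flatMap (fun x => if x = c then new else [x]) := by
  rw [PySem.Chars.replace, if_neg (by simp),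
    pv_replace_go_single c new s s.length [] (le_refl _)]
  simp

theorem pv_substFold_nil (ps : List (Int × Char)) :
    ps.foldl (fun ts p => PySem.Chars.replace ts [p.2] (PySem.Int.toChars p.1)) [] = [] := by
  induction ps with
  | nil => rfl
  | cons p ps ih => rw [List.foldl_cons, pv_replace_single]; simpa using ih

theorem pv_substFold_append (ps : List (Int × Char)) :
    ∀ (a b : List Char),
      ps.foldl (fun ts p => PySem.Chars.replace ts [p.2] (PySem.Int.toChars p.1)) (a ++ b)
        = ps.foldl (fun ts p => PySem.Chars.replace ts [p.2] (PySem.Int.toChars p.1)) a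
          ++ ps.foldl (fun ts p => PySem.Chars.replace ts [p.2] (PySem.Int.toChars p.1)) b := by
  induction ps with
  | nil => intro a b; rfl
  | cons p ps ih =>
    intro a b
    simp only [List.foldl_cons]
    rw [pv_replace_single, List.flatMap_append, ← pv_replace_single a,
      ← pv_replace_single b, ih]

theorem pv_subst_flatMap (nl : List Char) (s : List Char) :
    pvSubst nl s = s.flatMap (pvExpand nl) := by
  unfold pvSubst pvExpand pvSubst
  generalize PySem.List.enumerate nl 0 = ps
  induction s with
  | nil => simp [pv_substFold_nil]
  | cons x t ih =>
    rw [show (x :: t) = [x] ++ t from rfl, pv_substFold_append, ih]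
    simp

theorem pv_toChars_ne_nil (n : Int) : PySem.Int.toChars n ≠ [] := by
  unfold PySem.Int.toChars
  split_ifs
  · simp
  · rw [Nat.toDigits_eq_if (by norm_num)]
    split_ifs <;> simp

theorem pv_substFold_ne_nil (ps : List (Int × Char)) :
    ∀ (s : List Char), s ≠ [] →
      ps.foldl (fun ts p => PySem.Chars.replace ts [p.2] (PySem.Int.toChars p.1)) s ≠ [] := by
  induction ps with
  | nil => intro s h; exact h
  | cons p ps ih =>
    intro s h
    rw [List.foldl_cons]
    apply ih
    rw [pv_replace_single]
    cases s with
    | nil => exact absurd rfl h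
    | cons x t =>
      rw [List.flatMap_cons]
      by_cases hx : x = p.2
      · simp only [if_pos hx]
        intro hc
        rcases List.append_eq_nil_iff.mp hc with ⟨h1, _⟩
        exact pv_toChars_ne_nil p.1 h1
      · simp [if_neg hx]

theorem pv_subst_nil (nl : List Char) : pvSubst nl [] = [] :=
  pv_substFold_nil _

theorem pv_subst_ne_nil (nl : List Char) (s : List Char) (h : s ≠ []) :
    pvSubst nl s ≠ [] :=
  pv_substFold_ne_nil _ s h

-- ---------- part 3: Horner over the expanded token = A's power sum over the substituted token ----------

def pvVal (bf : Int) (c : Char) : Int :=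
  if PySem.Chars.find (PySem.List.slice pvAlph (some 0) (some bf)) [c] ≠ -1 then
    PySem.Chars.find (PySem.List.slice pvAlph (some 0) (some bf)) [c]
  else 0

theorem pv_ite_lin (v j w : Int) :
    (if v ≠ -1 then j + v * w else j) = j + (if v ≠ -1 then v else 0) * w := by
  split_ifs <;> simp

theorem pv_sum_enum_rev_cons (val : Char → Int) (bf : Int) (c : Char) (cs : List Char) :
    ((PySem.List.enumerate (c :: cs).reverse 0).map (fun p => val p.2 * bf ^ p.1.toNat)).sum
    = ((PySem.List.enumerate cs.reverse 0).map (fun p => val p.2 * bf ^ p.1.toNat)).sum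
      + val c * bf ^ cs.length := by
  rw [List.reverse_cons, PySem.List.enumerate_append]
  simp [PySem.List.enumerate_cons, PySem.List.enumerate_nil]

theorem pv_horner_eq_sum (val : Char → Int) (bf : Int) :
    ∀ (cs : List Char) (j0 : Int),
      cs.foldl (fun j c => j * bf + val c) j0
      = j0 * bf ^ cs.length
        + ((PySem.List.enumerate cs.reverse 0).map (fun p => val p.2 * bf ^ p.1.toNat)).sum
  | [], j0 => by simp [PySem.List.enumerate_nil]
  | c :: cs, j0 => by
    rw [List.foldl_cons, pv_horner_eq_sum val bf cs (j0 * bf + val c), pv_sum_enum_rev_cons]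
    simp only [List.length_cons]
    ring

theorem pv_digitsB_eq (e : Int) :
    pvDigitsB e = PySem.List.slice pvAlph (some 0) (some e) := by
  unfold pvDigitsB
  simp [PySem.List.slice, PySem.List.clampIdx]

theorem pv_j_eq (d : List Char) (e : Int) :
    d.foldl (fun j c =>
      let k := PySem.Chars.find (pvDigitsB e) [c]
      j * e + (if k ≠ -1 then k else 0)) 0 = pvBaseDecodeJA d e := by
  simp only [pvBaseDecodeJA]
  have hA : (fun (j : Int) (p : Int × Char) =>
      if PySem.Chars.find (PySem.List.slice pvAlph (some 0) (some e)) [p.2] ≠ -1 then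
        j + PySem.Chars.find (PySem.List.slice pvAlph (some 0) (some e)) [p.2] * e ^ p.1.toNat
      else j)
      = (fun (j : Int) (p : Int × Char) => j + pvVal e p.2 * e ^ p.1.toNat) :=
    funext fun j => funext fun p => pv_ite_lin _ _ _
  have hB : (fun (j : Int) (c : Char) =>
      let k := PySem.Chars.find (pvDigitsB e) [c]
      j * e + (if k ≠ -1 then k else 0))
      = (fun (j : Int) (c : Char) => j * e + pvVal e c) := by
    rw [pv_digitsB_eq]; rfl
  rw [hA, hB, PySem.List.foldl_add, pv_horner_eq_sum (pvVal e) e d 0]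
  simp

-- ---------- part 4: the streaming fold processes exactly the tokens of the delimiter split ----------

-- B's per-token effect on the output list (what one flush at a delimiter does)
def pvTokB (nl : List Char) (t : Int) (e : Int) (acc : List Int) (s : List Char) : List Int :=
  let j := s.foldl (fun j c =>
    (pvExpand nl c).foldl (fun j d =>
      let k := PySem.Chars.find (pvDigitsB e) [d]
      j * e + (if k ≠ -1 then k else 0)) j) 0
  if (!s.isEmpty) ∧ 0 ≤ j then
    if 0 ≤ j - t ∧ j - t < 1114112 then acc ++ [j - t] else acc
  else acc

-- a reference split function (first token, then split of the remainder past the delimiter)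
def pvSplit (delim : Char) (l : List Char) : List (List Char) :=
  l.takeWhile (fun c => c != delim) ::
    (if (l.dropWhile (fun c => c != delim)) = [] then []
     else pvSplit delim ((l.dropWhile (fun c => c != delim)).drop 1))
  termination_by l.length
  decreasing_by
    rename_i hdw
    have h1 : (l.dropWhile (fun c => c != delim)).length ≤ l.length := List.length_dropWhile_le _ _
    have h2 : 0 < (l.dropWhile (fun c => c != delim)).length := List.length_pos_iff.mpr hdw
    simp only [List.length_drop]; omega

theorem pv_scan_eq (nl : List Char) (t e : Int) (d : Char) :
    ∀ (N : Nat) (l : List Char) (acc : List Int), l.length ≤ N →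
      pvScanA nl t e d l acc = (pvSplit d l).foldl (pvTokA nl t e) acc
  | N, [], acc, _ => by
    rw [pvScanA, pvSplit]
    simp [pvTokA, pv_subst_nil]
  | 0, c :: rest, acc, h => by simp at h
  | N + 1, c :: rest, acc, h => by
    rw [pvScanA, dif_neg (List.cons_ne_nil c rest)]
    by_cases hdw : ((c :: rest).dropWhile (fun x => x != d)) = []
    · conv_rhs => rw [pvSplit]
      rw [if_pos hdw, hdw]
      simp only [List.drop_nil, List.foldl_cons, List.foldl_nil]
      rw [pvScanA]
      simp
    · conv_rhs => rw [pvSplit]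
      rw [if_neg hdw]
      simp only [List.foldl_cons]
      have hlen : (((c :: rest).dropWhile (fun x => x != d)).drop 1).length ≤ N := by
        have h1 : ((c :: rest).dropWhile (fun x => x != d)).length ≤ (c :: rest).length :=
          List.length_dropWhile_le _ _
        simp only [List.length_drop]
        simp at h
        simp only [List.length_cons] at h1
        omega
      rw [pv_scan_eq nl t e d N _ _ hlen]

theorem pv_stream_token (nl : List Char) (digits : List Char) (t e : Int) (delim : Char) :
    ∀ (s : List Char) (j : Int) (st : Bool) (out : List Int), (∀ c ∈ s, ¬ c = delim) →
      s.foldl (pvStepB nl digits t e delim) (j, st, out)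
        = (s.foldl (fun j c =>
             (pvExpand nl c).foldl (fun j d =>
               let k := PySem.Chars.find digits [d]
               j * e + (if k ≠ -1 then k else 0)) j) j,
           (st || !s.isEmpty), out) := by
  intro s
  induction s with
  | nil => intro j st out _; simp
  | cons c s' ih =>
    intro j st out h
    have hc : ¬ c = delim := h c (by simp)
    rw [List.foldl_cons, show pvStepB nl digits t e delim (j, st, out) c
      = ((pvExpand nl c).foldl (fun j d =>
           let k := PySem.Chars.find digits [d]
           j * e + (if k ≠ -1 then k else 0)) j, true, out) from by simp [pvStepB, hc]]
    rw [ih _ _ _ (fun x hx => h x (List.mem_cons_of_mem c hx))]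
    simp

theorem pv_stream_split (nl : List Char) (t e : Int) (delim : Char) :
    ∀ (N : Nat) (l : List Char) (out : List Int), l.length ≤ N →
      ((l ++ [delim]).foldl (pvStepB nl (pvDigitsB e) t e delim) (0, false, out)).2.2
        = (pvSplit delim l).foldl (pvTokB nl t e) out := by
  intro N
  induction N with
  | zero =>
    intro l out h
    have hl : l = [] := by cases l with | nil => rfl | cons a b => simp at h
    subst hl
    rw [pvSplit]
    simp [pvStepB, pvTokB]
  | succ N ih =>
    intro l out h
    have htw : ∀ c ∈ l.takeWhile (fun c => c != delim), ¬ c = delim := by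
      intro c hcm
      have := List.mem_takeWhile_imp hcm
      simpa using this
    have hl : l.takeWhile (fun c => c != delim) ++ l.dropWhile (fun c => c != delim) = l :=
      List.takeWhile_append_dropWhile
    conv_lhs => rw [← hl, List.append_assoc]
    rw [List.foldl_append, pv_stream_token nl (pvDigitsB e) t e delim _ 0 false out htw]
    conv_rhs => rw [pvSplit]
    cases hd : l.dropWhile (fun c => c != delim) with
    | nil =>
      simp only [List.nil_append, List.foldl_cons, List.foldl_nil]
      simp [pvStepB, pvTokB]
    | cons x r =>
      have hxd : x = delim := by
        have hne : l.dropWhile (fun c => c != delim) ≠ [] := by rw [hd]; simp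
        have h2 := List.head_dropWhile_not (p := fun c => c != delim) (l := l) hne
        have h3 : (l.dropWhile (fun c => c != delim)).head hne = x := by simp [hd]
        rw [h3] at h2
        simpa using h2
      rw [if_neg (by simp)]
      simp only [List.drop_succ_cons, List.drop_zero]
      have hlen : r.length ≤ N := by
        have h1 : (l.dropWhile (fun c => c != delim)).length ≤ l.length :=
          List.length_dropWhile_le _ _
        rw [hd] at h1
        simp only [List.length_cons] at h1
        omega
      rw [show (x :: r ++ [delim]) = x :: (r ++ [delim]) from rfl, List.foldl_cons,
        show pvStepB nl (pvDigitsB e) t e delim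
          (List.foldl (fun j c =>
             (pvExpand nl c).foldl (fun j d =>
               let k := PySem.Chars.find (pvDigitsB e) [d]
               j * e + (if k ≠ -1 then k else 0)) j) 0 (l.takeWhile (fun c => c != delim)),
           (false || !(l.takeWhile (fun c => c != delim)).isEmpty), out) x
          = (0, false, pvTokB nl t e out (l.takeWhile (fun c => c != delim))) from by
            simp [pvStepB, hxd, pvTokB]]
      rw [ih r _ hlen, List.foldl_cons]

-- ---------- part 5: per-token agreement ----------

theorem pv_tok_eq (nl : List Char) (t e : Int) (acc : List Int) (s : List Char) :
    pvTokB nl t e acc s = pvTokA nl t e acc s := by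
  unfold pvTokB pvTokA
  have hJ : s.foldl (fun j c =>
      (pvExpand nl c).foldl (fun j d =>
        let k := PySem.Chars.find (pvDigitsB e) [d]
        j * e + (if k ≠ -1 then k else 0)) j) 0 = pvBaseDecodeJA (pvSubst nl s) e := by
    rw [pv_subst_flatMap, ← pv_j_eq (s.flatMap (pvExpand nl)) e, List.foldl_flatMap]
  by_cases hs : s = []
  · subst hs
    simp [pv_subst_nil]
  · rw [if_pos (pv_subst_ne_nil nl s hs), pv_parse]
    simp only [hJ]
    by_cases hnn : 0 ≤ pvBaseDecodeJA (pvSubst nl s) e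
    · rw [if_pos hnn]
      have : (!s.isEmpty) = true := by
        cases s with | nil => exact absurd rfl hs | cons a b => rfl
      simp [this, hnn]
    · rw [if_neg hnn]
      simp [hnn]

-- ===== VERDICT (by name: the statement is the Claim_ definition above) =====
theorem deobfuscate_string_py_spec : Claim_equal_deobfuscate_string_py := by
  intro h_ u n t e r_param _ _
  unfold Spec_deobfuscate_string_py deobfuscate_string_py deobfuscate_string_py_alt
  cases hg : PySem.Str.pyGet? n e with
  | none => rfl
  | some delim =>
    show pvFinal (pvScanA n.toList t e delim h_.toList [])
      = pvFinal (((h_.toList ++ [delim]).foldl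
          (pvStepB n.toList (pvDigitsB e) t e delim) (0, false, [])).2.2)
    rw [pv_stream_split n.toList t e delim h_.toList.length h_.toList [] (le_refl _),
      pv_scan_eq n.toList t e delim h_.toList.length h_.toList [] (le_refl _)]
    congr 1
    exact PySem.List.foldl_congr_mem _ _ _ _
      (fun acc s _ => (pv_tok_eq n.toList t e acc s).symm)
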